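-- pv_equiv track=rewrite | github.com/FrAnCOisCokELaER/algos | leetcode_medium.py | longestpalindrom
-- ===== SOURCE A (Python) =====
-- def longestpalindrom(word):
--     #given an offset generate all possible substrings
--     def substrings(word, offset):
--         sublen = len(word) - offset
--         if sublen <= 0:
--             return list()
--         acc = []
--         for o in range(0,offset+1):
--             if o + sublen <= len(word):
--                 acc.append(word[o:o+sublen])
--         return acc
--     globalacc = []
--     for o in range(0, len(word)):
--         globalacc.append(substrings(word, o))
--
--     return globalacc
-- ===== SOURCE B (Python) =====
-- def longestpalindrom(word):
--     # scatter pass: one sweep over start positions, appending each substring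
--     # into the bucket for its length (bucket o holds the length n-o substrings)
--     n = len(word)
--     buckets = [[] for _ in range(n)]
--     for i in range(n):
--         for L in range(1, n - i + 1):
--             buckets[n - L].append(word[i:i + L])
--     return buckets
-- ===== Notes on version B (the rewrite author's own statement) =====
-- stated objective: alternative
-- what changed: B replaces A's gather (for each offset, rebuild the whole bucket with an inner scan over start positions plus a bounds test) by a scatter pass: pre-allocated buckets, one sweep over start positions appending each substring word[i:i+L] directly into bucket n-L, relying on the ascending start order to reproduce A's per-bucket order.
import Mathlib
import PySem

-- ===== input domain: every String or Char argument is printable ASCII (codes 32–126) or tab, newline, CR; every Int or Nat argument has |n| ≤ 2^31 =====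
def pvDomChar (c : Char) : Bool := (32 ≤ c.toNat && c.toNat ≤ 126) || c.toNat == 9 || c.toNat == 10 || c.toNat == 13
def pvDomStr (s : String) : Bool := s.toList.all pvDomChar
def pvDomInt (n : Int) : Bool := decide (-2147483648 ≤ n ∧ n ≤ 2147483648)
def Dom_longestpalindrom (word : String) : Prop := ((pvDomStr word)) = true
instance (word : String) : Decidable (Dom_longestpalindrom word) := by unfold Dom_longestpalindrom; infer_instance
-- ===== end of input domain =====

-- B replaces A's per-offset gather (inner scan over starts with a bounds test) by a single
-- scatter pass over start positions into pre-allocated length buckets; alternative, same cost.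


-- ===== PORT A =====
-- inner helper 'substrings(word, offset)'
def pvSubstringsA (word : String) (offset : Int) : List String :=
  let sublen : Int := PySem.Str.len word - offset
  if sublen ≤ 0 then []
  else
    (PySem.List.pyRange 0 (offset + 1) 1).foldl
      (fun acc o =>
        if o + sublen ≤ PySem.Str.len word then
          acc ++ [PySem.Str.slice word (some o) (some (o + sublen))]
        else acc) []

def longestpalindrom (word : String) : List (List String) :=
  (PySem.List.pyRange 0 (PySem.Str.len word) 1).foldl
    (fun globalacc o => globalacc ++ [pvSubstringsA word o]) []

-- ===== PORT B =====
def longestpalindrom_alt (word : String) : List (List String) :=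
  let n := word.toList.length
  (List.range n).foldl
    (fun bs i =>
      (List.range (n - i)).foldl
        (fun bs' j =>
          bs'.modify (n - (j + 1))
            (fun b => b ++ [PySem.Str.slice word (some (i : Int)) (some ((i : Int) + ((j + 1 : Nat) : Int)))]))
        bs)
    (List.replicate n [])

-- ===== PRECONDITION & SPEC =====
def Spec_longestpalindrom (word : String) (out : List (List String)) : Prop := out = longestpalindrom_alt word
instance (word : String) (out : List (List String)) : Decidable (Spec_longestpalindrom word out) := by unfold Spec_longestpalindrom; infer_instance

-- ===== CLAIM (what is proved, stated in full; the proofs are below) =====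
def Claim_equal_longestpalindrom : Prop := ∀ (word : String), Dom_longestpalindrom word → Spec_longestpalindrom word (longestpalindrom word)

-- ===== LEMMAS AND PROOFS =====

-- the substring word[s : s+l], as both ports compute it
def pvSlc (word : String) (s l : Nat) : String :=
  PySem.Str.slice word (some (s : Int)) (some ((s : Int) + (l : Int)))

-- common characterisation of the result
def pvTarget (word : String) : List (List String) :=
  (List.range word.toList.length).map
    (fun o => (List.range (o + 1)).map (fun s => pvSlc word s (word.toList.length - o)))

theorem pv_foldl_app {α β : Type} (f : α → β) :
    ∀ (l : List α) (acc : List β),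
      l.foldl (fun a x => a ++ [f x]) acc = acc ++ l.map f := by
  intro l
  induction l with
  | nil => intro acc; simp
  | cons x xs ih => intro acc; simp [List.foldl, ih]

theorem pv_foldl_app_if {α β : Type} (f : α → β) (p : α → Prop) [DecidablePred p]
    (l : List α) (hall : ∀ x ∈ l, p x) (acc : List β) :
    l.foldl (fun a x => if p x then a ++ [f x] else a) acc = acc ++ l.map f := by
  induction l generalizing acc with
  | nil => simp
  | cons x xs ih =>
    simp only [List.foldl, List.map]
    rw [if_pos (hall x (by simp)), ih (fun y hy => hall y (by simp [hy]))]
    simp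

theorem pvA_sub (word : String) (k : Nat) (hk : k < word.toList.length) :
    pvSubstringsA word (0 + (k : Int))
      = (List.range (k + 1)).map (fun s => pvSlc word s (word.toList.length - k)) := by
  simp only [pvSubstringsA, PySem.Str.len_eq]
  rw [if_neg (by omega)]
  rw [PySem.List.pyRange_one]
  rw [show (0 + (k : Int) + 1 - 0).toNat = k + 1 from by omega]
  rw [pv_foldl_app_if (fun o => PySem.Str.slice word (some o) (some (o + ((word.toList.length : Int) - (0 + (k : Int))))))
        (fun o => o + ((word.toList.length : Int) - (0 + (k : Int))) ≤ (word.toList.length : Int))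
        _ (by intro x hx; simp only [List.mem_map, List.mem_range] at hx; obtain ⟨j, hj, rfl⟩ := hx; omega)]
  rw [List.nil_append, List.map_map]
  apply List.map_congr_left
  intro j hj
  rw [List.mem_range] at hj
  simp only [Function.comp, pvSlc]
  rw [show ((0 : Int) + (j : Int)) = (j : Int) from by omega,
      show ((word.toList.length : Int) - (0 + (k : Int))) = ((word.toList.length - k : Nat) : Int) from by omega]

theorem pvA_eq_target (word : String) : longestpalindrom word = pvTarget word := by
  unfold longestpalindrom pvTarget
  rw [pv_foldl_app, PySem.Str.len_eq, PySem.List.pyRange_one]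
  rw [show ((word.toList.length : Int) - 0).toNat = word.toList.length from by omega]
  rw [List.nil_append, List.map_map]
  apply List.map_congr_left
  intro k hk
  rw [List.mem_range] at hk
  exact pvA_sub word k hk

-- intermediate state of B's outer loop after i iterations
def pvG (word : String) (i : Nat) : List (List String) :=
  (List.range word.toList.length).map
    (fun o => (List.range (min i (o + 1))).map (fun s => pvSlc word s (word.toList.length - o)))

theorem pv_modify_map_range {β : Type} (n k : Nat) (F : Nat → β) (f : β → β) :
    ((List.range n).map F).modify k f
      = (List.range n).map (fun o => if o = k then f (F o) else F o) := by
  apply List.ext_getElem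
  · simp
  · intro j h1 h2
    simp only [List.getElem_modify, List.getElem_map, List.getElem_range]
    simp at h1
    by_cases hk : k = j
    · simp [hk]
    · rw [if_neg hk, if_neg (fun h => hk h.symm)]

-- B's loop bodies, named for the proofs (definitionally the port's lambdas)
def pvInnerStep (word : String) (i : Nat) (bs' : List (List String)) (j : Nat) : List (List String) :=
  bs'.modify (word.toList.length - (j + 1))
    (fun b => b ++ [PySem.Str.slice word (some (i : Int)) (some ((i : Int) + ((j + 1 : Nat) : Int)))])

def pvOuterStep (word : String) (bs : List (List String)) (i : Nat) : List (List String) :=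
  (List.range (word.toList.length - i)).foldl (pvInnerStep word i) bs

-- state of B's buckets while the inner loop at start position i has run t iterations
def pvState (word : String) (i t : Nat) : List (List String) :=
  (List.range word.toList.length).map (fun o =>
    (List.range (min i (o + 1))).map (fun s => pvSlc word s (word.toList.length - o))
      ++ if word.toList.length - t ≤ o then [pvSlc word i (word.toList.length - o)] else [])

theorem pv_inner_inv (word : String) (i : Nat) (hi : i < word.toList.length) :
    ∀ t, t ≤ word.toList.length - i →
      (List.range t).foldl (pvInnerStep word i) (pvG word i) = pvState word i t := by
  intro t
  induction t with
  | zero =>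
    intro _
    simp only [List.range_zero, List.foldl_nil, pvG, pvState]
    apply List.map_congr_left
    intro o ho
    rw [List.mem_range] at ho
    rw [if_neg (by omega)]
    simp
  | succ t ih =>
    intro ht
    rw [List.range_succ, List.foldl_append, ih (by omega)]
    simp only [List.foldl_cons, List.foldl_nil]
    show pvInnerStep word i (pvState word i t) t = pvState word i (t + 1)
    unfold pvInnerStep pvState
    rw [pv_modify_map_range]
    apply List.map_congr_left
    intro o ho
    rw [List.mem_range] at ho
    by_cases h : o = word.toList.length - (t + 1)
    · rw [if_pos h]
      rw [if_neg (by omega), if_pos (by omega)]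
      have hno : word.toList.length - o = t + 1 := by omega
      rw [hno]
      simp [pvSlc]
    · rw [if_neg h]
      by_cases h2 : word.toList.length - t ≤ o
      · rw [if_pos h2, if_pos (by omega)]
      · rw [if_neg h2, if_neg (by omega)]

theorem pv_state_full (word : String) (i : Nat) (hi : i < word.toList.length) :
    pvState word i (word.toList.length - i) = pvG word (i + 1) := by
  unfold pvState pvG
  apply List.map_congr_left
  intro o ho
  rw [List.mem_range] at ho
  by_cases h : i ≤ o
  · rw [if_pos (by omega)]
    rw [min_eq_left (by omega), min_eq_left (by omega), List.range_succ, List.map_append]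
    simp
  · rw [if_neg (by omega)]
    rw [min_eq_right (by omega), min_eq_right (by omega)]
    simp

theorem pv_outer_inv (word : String) :
    ∀ i, i ≤ word.toList.length →
      (List.range i).foldl (pvOuterStep word) (List.replicate word.toList.length [])
        = pvG word i := by
  intro i
  induction i with
  | zero =>
    intro _
    simp only [List.range_zero, List.foldl_nil, pvG]
    apply List.ext_getElem
    · simp
    · intro j h1 h2
      simp
  | succ i ih =>
    intro hi
    rw [List.range_succ, List.foldl_append, ih (by omega)]
    simp only [List.foldl_cons, List.foldl_nil]
    show pvOuterStep word (pvG word i) i = pvG word (i + 1)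
    unfold pvOuterStep
    rw [pv_inner_inv word i (by omega) _ (le_refl _)]
    exact pv_state_full word i (by omega)

theorem pvB_eq_target (word : String) : longestpalindrom_alt word = pvTarget word := by
  have h : longestpalindrom_alt word
      = (List.range word.toList.length).foldl (pvOuterStep word)
          (List.replicate word.toList.length []) := rfl
  rw [h, pv_outer_inv word _ (le_refl _)]
  unfold pvG pvTarget
  apply List.map_congr_left
  intro o ho
  rw [List.mem_range] at ho
  rw [min_eq_right (by omega)]

theorem longestpalindrom_spec_aux (word : String) :
    longestpalindrom word = longestpalindrom_alt word := by
  rw [pvA_eq_target, pvB_eq_target]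

-- ===== VERDICT (by name: the statement is the Claim_ definition above) =====
theorem longestpalindrom_spec : Claim_equal_longestpalindrom := by
  intro word _
  exact longestpalindrom_spec_aux word
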